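-- pv_equiv track=rewrite | github.com/paiml/depyler | examples/test_performance_warnings.py | repeated_sum
-- ===== SOURCE A (Python) =====
-- from typing import List
--
-- def repeated_sum(data: List[int]) -> int:
--     """Sum computed repeatedly (simulates expensive recomputation)."""
--     result: int = 0
--     for item in data:
--         data_sum: int = 0
--         for x in data:
--             data_sum = data_sum + x
--         result = result + item * data_sum
--     return result
-- ===== SOURCE B (Python) =====
-- from typing import List
--
-- def repeated_sum(data: List[int]) -> int:
--     """Sum computed once: result equals (sum of data) squared."""
--     s = sum(data)
--     return s * s
-- ===== Notes on version B (the rewrite author's own statement) =====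
-- stated objective: faster
-- what changed: Replaced the nested loop (re-summing the whole list for every item) by computing S = sum(data) once and returning S*S.
import Mathlib
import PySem

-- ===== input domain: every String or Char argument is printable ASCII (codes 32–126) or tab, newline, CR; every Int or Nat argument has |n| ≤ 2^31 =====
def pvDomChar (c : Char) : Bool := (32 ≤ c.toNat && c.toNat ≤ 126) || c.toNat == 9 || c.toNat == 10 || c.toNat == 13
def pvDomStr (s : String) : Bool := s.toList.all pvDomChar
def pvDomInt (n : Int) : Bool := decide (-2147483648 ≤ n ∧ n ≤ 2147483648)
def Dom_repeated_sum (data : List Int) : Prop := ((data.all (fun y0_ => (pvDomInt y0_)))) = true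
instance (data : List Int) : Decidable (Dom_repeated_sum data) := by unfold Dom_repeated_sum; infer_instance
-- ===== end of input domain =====

-- B replaces A's quadratic re-summation by computing S = sum(data) once and returning S*S (faster, asymptotic).

-- ===== PORT A =====
-- literal transliteration: outer loop accumulates result, inner loop recomputes data_sum each iteration
def repeated_sum (data : List Int) : Int :=
  data.foldl (fun result item =>
    result + item * (data.foldl (fun data_sum x => data_sum + x) 0)) 0

-- ===== PORT B =====
def repeated_sum_alt (data : List Int) : Int :=
  let s := data.foldl (fun a x => a + x) 0  -- sum(data)
  s * s

-- ===== PRECONDITION & SPEC =====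
def Spec_repeated_sum (data : List Int) (out : Int) : Prop := out = repeated_sum_alt data
instance (data : List Int) (out : Int) : Decidable (Spec_repeated_sum data out) := by unfold Spec_repeated_sum; infer_instance

-- ===== CLAIM (what is proved, stated in full; the proofs are below) =====
def Claim_equal_repeated_sum : Prop := ∀ (data : List Int), Dom_repeated_sum data → Spec_repeated_sum data (repeated_sum data)

-- ===== LEMMAS AND PROOFS =====
theorem pv_foldl_add (l : List Int) (a : Int) :
    l.foldl (fun data_sum x => data_sum + x) a = a + l.sum := by
  induction l generalizing a with
  | nil => simp
  | cons h t ih => simp [List.foldl, ih]; ring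

theorem pv_outer (l : List Int) (S a : Int) :
    l.foldl (fun result item => result + item * S) a = a + l.sum * S := by
  induction l generalizing a with
  | nil => simp
  | cons h t ih => simp [List.foldl, ih]; ring

-- ===== VERDICT (by name: the statement is the Claim_ definition above) =====
theorem repeated_sum_spec : Claim_equal_repeated_sum := by
  intro data _
  unfold Spec_repeated_sum repeated_sum repeated_sum_alt
  simp only [pv_outer, pv_foldl_add]
  ring
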